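-- pv_equiv track=rewrite | github.com/duyuefeng0708/Cryptography-From-First-Principle | scripts/fix_char_source.py | fix_source
-- ===== SOURCE A (Python) =====
-- def fix_source(source: list[str]) -> list[str]:
--     """Join character-level source back into lines."""
--     full_text = ''.join(source)
--     if not full_text:
--         return source
--
--     # Split into lines, preserving newlines
--     lines = full_text.split('\n')
--     # Re-add newlines to all lines except the last (if it's empty)
--     result = []
--     for i, line in enumerate(lines):
--         if i < len(lines) - 1:
--             result.append(line + '\n')
--         elif line:  # last line, only add if non-empty
--             result.append(line)
--
--     return result
-- ===== SOURCE B (Python) =====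
-- def fix_source(source: list[str]) -> list[str]:
--     """Join character-level source back into lines (single streaming pass)."""
--     full_text = ''.join(source)
--     if not full_text:
--         return source
--     result = []
--     cur = ''
--     for ch in full_text:
--         if ch == '\n':
--             result.append(cur + '\n')
--             cur = ''
--         else:
--             cur += ch
--     if cur:
--         result.append(cur)
--     return result
-- ===== Notes on version B (the rewrite author's own statement) =====
-- stated objective: simpler
-- what changed: Replaced split('\n') plus an index-counting enumerate loop that re-attaches newlines with a single streaming pass over the joined text that emits each line as its terminating newline is seen.
import Mathlib
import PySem

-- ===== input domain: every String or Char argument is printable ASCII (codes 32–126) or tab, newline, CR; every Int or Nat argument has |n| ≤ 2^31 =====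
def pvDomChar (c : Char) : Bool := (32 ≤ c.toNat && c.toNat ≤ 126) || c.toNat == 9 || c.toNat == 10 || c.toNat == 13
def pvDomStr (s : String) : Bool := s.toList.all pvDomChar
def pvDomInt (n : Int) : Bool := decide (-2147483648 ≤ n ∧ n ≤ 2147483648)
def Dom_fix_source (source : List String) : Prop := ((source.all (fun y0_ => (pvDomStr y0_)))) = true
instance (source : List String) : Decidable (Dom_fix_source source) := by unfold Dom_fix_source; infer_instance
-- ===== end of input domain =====

-- B replaces A's split-then-reattach (split('\n') + enumerate/index loop) by one streaming pass
-- over the joined text; objective: simpler. Return values proved equal on all inputs.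

-- ===== PORT A =====
def fix_source (source : List String) : List String :=
  let full_text := PySem.Str.join "" source
  if full_text = "" then source
  else
    let lines := PySem.Chars.splitOn full_text.toList ['\n']
    let result := (PySem.List.enumerate lines 0).foldl
      (fun (res : List String) (p : Int × List Char) =>
        if p.1 < (lines.length : Int) - 1 then res ++ [String.mk (p.2 ++ ['\n'])]
        else if p.2 ≠ [] then res ++ [String.mk p.2] else res) []
    result

-- ===== PORT B =====
def fix_source_alt (source : List String) : List String :=
  let full_text := PySem.Str.join "" source
  if full_text = "" then source
  else
    let st := full_text.toList.foldl
      (fun (st : List String × List Char) (c : Char) =>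
        if c = '\n' then (st.1 ++ [String.mk (st.2 ++ ['\n'])], ([] : List Char))
        else (st.1, st.2 ++ [c])) (([] : List String), ([] : List Char))
    if st.2 ≠ [] then st.1 ++ [String.mk st.2] else st.1

-- ===== PRECONDITION & SPEC =====
def Spec_fix_source (source : List String) (out : List String) : Prop := out = fix_source_alt source
instance (source : List String) (out : List String) : Decidable (Spec_fix_source source out) := by unfold Spec_fix_source; infer_instance

-- ===== CLAIM (what is proved, stated in full; the proofs are below) =====
def Claim_equal_fix_source : Prop := ∀ (source : List String), Dom_fix_source source → Spec_fix_source source (fix_source source)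

-- ===== LEMMAS AND PROOFS =====

-- prepend a prefix to the first segment (reference helper for the proofs)
def consHead (p : List Char) : List (List Char) → List (List Char)
  | [] => [p]
  | s :: r => (p ++ s) :: r

-- reference split on '\n'
def mySplit : List Char → List (List Char)
  | [] => [[]]
  | c :: t => if c = '\n' then [] :: mySplit t else consHead [c] (mySplit t)

-- reference output: newline re-attached to all segments but the last; last kept iff non-empty
def outA : List (List Char) → List String
  | [] => []
  | [l] => if l ≠ [] then [String.mk l] else []
  | l :: s :: r => String.mk (l ++ ['\n']) :: outA (s :: r)

theorem mySplit_ne_nil (cs : List Char) : mySplit cs ≠ [] := by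
  cases cs with
  | nil => simp [mySplit]
  | cons c t =>
    simp only [mySplit]
    split
    · simp
    · cases h : mySplit t <;> simp [consHead]

theorem consHead_nil_of_ne (ms : List (List Char)) (h : ms ≠ []) : consHead [] ms = ms := by
  cases ms with
  | nil => exact absurd rfl h
  | cons s r => simp [consHead]

theorem consHead_consHead (a b : List Char) (ms : List (List Char)) :
    consHead a (consHead b ms) = consHead (a ++ b) ms := by
  cases ms <;> simp [consHead]

theorem outA_cons (l : List Char) (ms : List (List Char)) (h : ms ≠ []) :
    outA (l :: ms) = String.mk (l ++ ['\n']) :: outA ms := by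
  cases ms with
  | nil => exact absurd rfl h
  | cons s r => simp [outA]

theorem go_eq (fuel : Nat) (l cur : List Char) (acc : List (List Char))
    (h : l.length < fuel) :
    PySem.Chars.splitOn.go ['\n'] fuel l cur acc =
      acc.reverse ++ consHead cur.reverse (mySplit l) := by
  induction fuel generalizing l cur acc with
  | zero => omega
  | succ f ih =>
    cases l with
    | nil =>
      show (cur.reverse :: acc).reverse = _
      simp [mySplit, consHead]
    | cons c rest =>
      have hred : PySem.Chars.splitOn.go ['\n'] (f+1) (c :: rest) cur acc
          = if List.isPrefixOf ['\n'] (c :: rest) = true then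
              PySem.Chars.splitOn.go ['\n'] f (List.drop (List.length ['\n']) (c :: rest)) [] (cur.reverse :: acc)
            else
              PySem.Chars.splitOn.go ['\n'] f rest (c :: cur) acc := rfl
      by_cases hc : c = '\n'
      · subst hc
        rw [hred]
        rw [if_pos (by simp [List.isPrefixOf])]
        rw [ih _ _ _ (by simpa using Nat.lt_of_succ_lt_succ h)]
        simp only [List.reverse_nil, List.length_cons, List.length_nil, List.drop_succ_cons,
          List.drop_zero]
        rw [consHead_nil_of_ne _ (mySplit_ne_nil rest)]
        simp [mySplit, consHead]
      · rw [hred]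
        rw [if_neg (by simp [List.isPrefixOf]; exact fun h => hc h.symm)]
        rw [ih _ _ _ (by simpa using Nat.lt_of_succ_lt_succ h)]
        rw [List.reverse_cons, ← consHead_consHead]
        simp [mySplit, hc, consHead]

theorem splitOn_eq (cs : List Char) : PySem.Chars.splitOn cs ['\n'] = mySplit cs := by
  show PySem.Chars.splitOn.go ['\n'] (cs.length + 1) cs [] [] = mySplit cs
  rw [go_eq _ _ _ _ (by omega)]
  simp only [List.reverse_nil]
  rw [consHead_nil_of_ne _ (mySplit_ne_nil cs)]
  simp

theorem auxA (rest : List (List Char)) (s n : Int) (res : List String)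
    (hn : s + rest.length = n) :
    (PySem.List.enumerate rest s).foldl
      (fun (r : List String) (p : Int × List Char) =>
        if p.1 < n - 1 then r ++ [String.mk (p.2 ++ ['\n'])]
        else if p.2 ≠ [] then r ++ [String.mk p.2] else r) res
      = res ++ outA rest := by
  induction rest generalizing s res with
  | nil => simp [PySem.List.enumerate, outA]
  | cons l rest ih =>
    rw [PySem.List.enumerate_cons, List.foldl_cons]
    cases rest with
    | nil =>
      have hs : ¬ (s < n - 1) := by simp at hn; omega
      simp only [hs, if_neg, not_false_iff]
      rw [ih (s+1) _ (by simp at hn ⊢; omega)]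
      by_cases hl : l ≠ [] <;> simp [outA, hl, PySem.List.enumerate]
    | cons m r =>
      have hs : s < n - 1 := by simp at hn; omega
      simp only [hs, if_pos]
      rw [ih (s+1) _ (by simp at hn ⊢; push_cast; omega)]
      simp [outA]

theorem auxB (cs : List Char) (res : List String) (cur : List Char) :
    (let st := cs.foldl
      (fun (st : List String × List Char) (c : Char) =>
        if c = '\n' then (st.1 ++ [String.mk (st.2 ++ ['\n'])], ([] : List Char))
        else (st.1, st.2 ++ [c])) (res, cur);
      if st.2 ≠ [] then st.1 ++ [String.mk st.2] else st.1)
      = res ++ outA (consHead cur (mySplit cs)) := by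
  induction cs generalizing res cur with
  | nil =>
    by_cases h : cur = [] <;> simp [mySplit, consHead, outA, h]
  | cons c t ih =>
    by_cases hc : c = '\n'
    · subst hc
      simp only [List.foldl_cons, if_pos]
      rw [ih]
      rw [consHead_nil_of_ne _ (mySplit_ne_nil t)]
      simp only [mySplit, if_pos, consHead]
      rw [outA_cons _ _ (mySplit_ne_nil t)]
      simp
    · simp only [List.foldl_cons, hc, if_neg, not_false_iff]
      rw [ih]
      simp only [mySplit, hc, if_neg, not_false_iff]
      rw [consHead_consHead]

-- ===== VERDICT (by name: the statement is the Claim_ definition above) =====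
theorem fix_source_spec : Claim_equal_fix_source := by
  intro source _
  unfold Spec_fix_source fix_source fix_source_alt
  by_cases h : PySem.Str.join "" source = ""
  · simp [h]
  · simp only [h, if_neg, not_false_iff]
    rw [splitOn_eq]
    rw [auxA _ 0 _ [] (by simp)]
    rw [auxB]
    rw [consHead_nil_of_ne _ (mySplit_ne_nil _)]
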